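-- pv_equiv track=rewrite | github.com/Roonil/AES-128-using-Python | Funcs.py | lookupSBox
-- ===== SOURCE A (Python) =====
-- def lookupSBox(inValue):
--     sBox = [
--         0x63, 0x7c, 0x77, 0x7b, 0xf2, 0x6b, 0x6f, 0xc5, 0x30, 0x01, 0x67, 0x2b, 0xfe, 0xd7, 0xab, 0x76,
--         0xca, 0x82, 0xc9, 0x7d, 0xfa, 0x59, 0x47, 0xf0, 0xad, 0xd4, 0xa2, 0xaf, 0x9c, 0xa4, 0x72, 0xc0,
--         0xb7, 0xfd, 0x93, 0x26, 0x36, 0x3f, 0xf7, 0xcc, 0x34, 0xa5, 0xe5, 0xf1, 0x71, 0xd8, 0x31, 0x15,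
--         0x04, 0xc7, 0x23, 0xc3, 0x18, 0x96, 0x05, 0x9a, 0x07, 0x12, 0x80, 0xe2, 0xeb, 0x27, 0xb2, 0x75,
--         0x09, 0x83, 0x2c, 0x1a, 0x1b, 0x6e, 0x5a, 0xa0, 0x52, 0x3b, 0xd6, 0xb3, 0x29, 0xe3, 0x2f, 0x84,
--         0x53, 0xd1, 0x00, 0xed, 0x20, 0xfc, 0xb1, 0x5b, 0x6a, 0xcb, 0xbe, 0x39, 0x4a, 0x4c, 0x58, 0xcf,
--         0xd0, 0xef, 0xaa, 0xfb, 0x43, 0x4d, 0x33, 0x85, 0x45, 0xf9, 0x02, 0x7f, 0x50, 0x3c, 0x9f, 0xa8,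
--         0x51, 0xa3, 0x40, 0x8f, 0x92, 0x9d, 0x38, 0xf5, 0xbc, 0xb6, 0xda, 0x21, 0x10, 0xff, 0xf3, 0xd2,
--         0xcd, 0x0c, 0x13, 0xec, 0x5f, 0x97, 0x44, 0x17, 0xc4, 0xa7, 0x7e, 0x3d, 0x64, 0x5d, 0x19, 0x73,
--         0x60, 0x81, 0x4f, 0xdc, 0x22, 0x2a, 0x90, 0x88, 0x46, 0xee, 0xb8, 0x14, 0xde, 0x5e, 0x0b, 0xdb,
--         0xe0, 0x32, 0x3a, 0x0a, 0x49, 0x06, 0x24, 0x5c, 0xc2, 0xd3, 0xac, 0x62, 0x91, 0x95, 0xe4, 0x79,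
--         0xe7, 0xc8, 0x37, 0x6d, 0x8d, 0xd5, 0x4e, 0xa9, 0x6c, 0x56, 0xf4, 0xea, 0x65, 0x7a, 0xae, 0x08,
--         0xba, 0x78, 0x25, 0x2e, 0x1c, 0xa6, 0xb4, 0xc6, 0xe8, 0xdd, 0x74, 0x1f, 0x4b, 0xbd, 0x8b, 0x8a,
--         0x70, 0x3e, 0xb5, 0x66, 0x48, 0x03, 0xf6, 0x0e, 0x61, 0x35, 0x57, 0xb9, 0x86, 0xc1, 0x1d, 0x9e,
--         0xe1, 0xf8, 0x98, 0x11, 0x69, 0xd9, 0x8e, 0x94, 0x9b, 0x1e, 0x87, 0xe9, 0xce, 0x55, 0x28, 0xdf,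
--         0x8c, 0xa1, 0x89, 0x0d, 0xbf, 0xe6, 0x42, 0x68, 0x41, 0x99, 0x2d, 0x0f, 0xb0, 0x54, 0xbb, 0x16
--     ]
--
--     res = []
--
--     for i in range(len(inValue)):
--         res.append(hex(sBox[int(inValue[i], base=16)]))
--
--     return res
-- ===== SOURCE B (Python) =====
-- def _gmul(a, b):
--     # carry-less multiply of two field elements, reduced by the Rijndael polynomial 0x11b
--     r = 0
--     for _ in range(8):
--         if b & 1:
--             r ^= a
--         b >>= 1
--         a <<= 1
--         if a & 0x100:
--             a ^= 0x11b
--     return r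
--
--
-- def _sbox(b):
--     # multiplicative inverse in GF(2^8) as b^254 (square-and-multiply; 0 maps to 0) ...
--     inv = b
--     for _ in range(6):
--         inv = _gmul(_gmul(inv, inv), b)
--     inv = _gmul(inv, inv)
--     # ... then the AES affine transform
--     rotl = lambda x, k: ((x << k) | (x >> (8 - k))) & 0xFF
--     return inv ^ rotl(inv, 1) ^ rotl(inv, 2) ^ rotl(inv, 3) ^ rotl(inv, 4) ^ 0x63
--
--
-- def lookupSBox(inValue):
--     return [hex(_sbox(int(v, 16) & 0xFF)) for v in inValue]
-- ===== Notes on version B (the rewrite author's own statement) =====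
-- stated objective: alternative
-- what changed: B drops A's 256-entry S-box table entirely and computes each substitution algebraically: GF(2^8) multiplicative inverse via square-and-multiply carry-less multiplication (b^254 mod 0x11b), followed by the AES affine transform; masking the parsed byte with & 0xff reproduces Python's negative-index wraparound.
import Mathlib
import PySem

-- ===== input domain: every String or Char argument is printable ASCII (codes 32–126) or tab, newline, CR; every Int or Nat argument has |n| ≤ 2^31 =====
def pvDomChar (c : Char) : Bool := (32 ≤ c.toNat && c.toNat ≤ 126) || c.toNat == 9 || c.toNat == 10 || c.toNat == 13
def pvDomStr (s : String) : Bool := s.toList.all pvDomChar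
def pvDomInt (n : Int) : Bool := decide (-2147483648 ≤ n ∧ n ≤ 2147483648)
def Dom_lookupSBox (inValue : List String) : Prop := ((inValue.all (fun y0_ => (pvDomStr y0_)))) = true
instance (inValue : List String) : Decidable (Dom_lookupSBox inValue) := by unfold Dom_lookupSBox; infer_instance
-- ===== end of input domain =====

-- B replaces A's 256-entry S-box table by computing each substitution algebraically
-- (GF(2^8) inverse via square-and-multiply, then the AES affine transform); objective: alternative.

-- shared port of the Python built-in hex(n) (lowercase digits, "0x" prefix, "-" sign first)
def pyHexDig (n : Nat) : Char := if n < 10 then Char.ofNat (48 + n) else Char.ofNat (87 + n)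

def pyHexDigits : Nat → List Char
  | 0 => []
  | n + 1 => pyHexDigits ((n + 1) / 16) ++ [pyHexDig ((n + 1) % 16)]
decreasing_by exact Nat.div_lt_self (Nat.succ_pos n) (by omega)

def pyHex (n : Int) : String :=
  if n < 0 then String.ofList ('-' :: '0' :: 'x' :: pyHexDigits n.natAbs)
  else if n = 0 then "0x0"
  else String.ofList ('0' :: 'x' :: pyHexDigits n.toNat)

-- ===== PORT A =====
def sBoxTable : List Int := [
  0x63, 0x7c, 0x77, 0x7b, 0xf2, 0x6b, 0x6f, 0xc5, 0x30, 0x01, 0x67, 0x2b, 0xfe, 0xd7, 0xab, 0x76,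
  0xca, 0x82, 0xc9, 0x7d, 0xfa, 0x59, 0x47, 0xf0, 0xad, 0xd4, 0xa2, 0xaf, 0x9c, 0xa4, 0x72, 0xc0,
  0xb7, 0xfd, 0x93, 0x26, 0x36, 0x3f, 0xf7, 0xcc, 0x34, 0xa5, 0xe5, 0xf1, 0x71, 0xd8, 0x31, 0x15,
  0x04, 0xc7, 0x23, 0xc3, 0x18, 0x96, 0x05, 0x9a, 0x07, 0x12, 0x80, 0xe2, 0xeb, 0x27, 0xb2, 0x75,
  0x09, 0x83, 0x2c, 0x1a, 0x1b, 0x6e, 0x5a, 0xa0, 0x52, 0x3b, 0xd6, 0xb3, 0x29, 0xe3, 0x2f, 0x84,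
  0x53, 0xd1, 0x00, 0xed, 0x20, 0xfc, 0xb1, 0x5b, 0x6a, 0xcb, 0xbe, 0x39, 0x4a, 0x4c, 0x58, 0xcf,
  0xd0, 0xef, 0xaa, 0xfb, 0x43, 0x4d, 0x33, 0x85, 0x45, 0xf9, 0x02, 0x7f, 0x50, 0x3c, 0x9f, 0xa8,
  0x51, 0xa3, 0x40, 0x8f, 0x92, 0x9d, 0x38, 0xf5, 0xbc, 0xb6, 0xda, 0x21, 0x10, 0xff, 0xf3, 0xd2,
  0xcd, 0x0c, 0x13, 0xec, 0x5f, 0x97, 0x44, 0x17, 0xc4, 0xa7, 0x7e, 0x3d, 0x64, 0x5d, 0x19, 0x73,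
  0x60, 0x81, 0x4f, 0xdc, 0x22, 0x2a, 0x90, 0x88, 0x46, 0xee, 0xb8, 0x14, 0xde, 0x5e, 0x0b, 0xdb,
  0xe0, 0x32, 0x3a, 0x0a, 0x49, 0x06, 0x24, 0x5c, 0xc2, 0xd3, 0xac, 0x62, 0x91, 0x95, 0xe4, 0x79,
  0xe7, 0xc8, 0x37, 0x6d, 0x8d, 0xd5, 0x4e, 0xa9, 0x6c, 0x56, 0xf4, 0xea, 0x65, 0x7a, 0xae, 0x08,
  0xba, 0x78, 0x25, 0x2e, 0x1c, 0xa6, 0xb4, 0xc6, 0xe8, 0xdd, 0x74, 0x1f, 0x4b, 0xbd, 0x8b, 0x8a,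
  0x70, 0x3e, 0xb5, 0x66, 0x48, 0x03, 0xf6, 0x0e, 0x61, 0x35, 0x57, 0xb9, 0x86, 0xc1, 0x1d, 0x9e,
  0xe1, 0xf8, 0x98, 0x11, 0x69, 0xd9, 0x8e, 0x94, 0x9b, 0x1e, 0x87, 0xe9, 0xce, 0x55, 0x28, 0xdf,
  0x8c, 0xa1, 0x89, 0x0d, 0xbf, 0xe6, 0x42, 0x68, 0x41, 0x99, 0x2d, 0x0f, 0xb0, 0x54, 0xbb, 0x16]

-- body of A's loop: hex(sBox[int(inValue[i], base=16)]); the .getD defaults are unreachable under Pre_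
def lookupSBoxElemA (s : String) : String :=
  pyHex (((PySem.Int.ofStrBase? s 16).bind (fun b => PySem.List.pyGet? sBoxTable b)).getD 0)

def lookupSBox (inValue : List String) : List String :=
  (PySem.List.pyRange 0 (PySem.List.len inValue)).foldl
    (fun res i => res ++ [lookupSBoxElemA (PySem.List.pyGetD inValue i "")]) []

-- ===== PORT B =====
-- _gmul: carry-less multiply reduced by 0x11b; loop state is (r, a, b)
def gmul (a b : Int) : Int :=
  ((List.range 8).foldl
    (fun (rab : Int × Int × Int) _ =>
      let r := if PySem.Int.band rab.2.2 1 ≠ 0 then PySem.Int.bxor rab.1 rab.2.1 else rab.1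
      let b' := rab.2.2 >>> (1 : Nat)
      let a' := rab.2.1 <<< (1 : Nat)
      let a' := if PySem.Int.band a' 256 ≠ 0 then PySem.Int.bxor a' 0x11b else a'
      (r, a', b'))
    (0, a, b)).1

def rotl8 (x : Int) (k : Nat) : Int :=
  PySem.Int.band (PySem.Int.bor (x <<< k) (x >>> (8 - k))) 0xFF

-- _sbox: inverse as b^254 by square-and-multiply, then the affine transform
def sboxByte (b : Int) : Int :=
  let inv := (List.range 6).foldl (fun inv _ => gmul (gmul inv inv) b) b
  let inv := gmul inv inv
  PySem.Int.bxor (PySem.Int.bxor (PySem.Int.bxor (PySem.Int.bxor (PySem.Int.bxor inv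
    (rotl8 inv 1)) (rotl8 inv 2)) (rotl8 inv 3)) (rotl8 inv 4)) 0x63

def lookupSBoxElemB (v : String) : String :=
  pyHex (sboxByte (PySem.Int.band ((PySem.Int.ofStrBase? v 16).getD 0) 0xFF))

def lookupSBox_alt (inValue : List String) : List String :=
  inValue.map lookupSBoxElemB

-- ===== PRECONDITION & SPEC =====
-- Pre_ excludes exactly the inputs where Python A raises: a string int(·, 16) rejects
-- (ValueError) or one parsing outside [-256, 255], where sBox[b] raises IndexError.
def Pre_lookupSBox (inValue : List String) : Prop :=
  (inValue.all (fun s =>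
    match PySem.Int.ofStrBase? s 16 with
    | some b => decide (-256 ≤ b ∧ b ≤ 255)
    | none => false)) = true

instance (inValue : List String) : Decidable (Pre_lookupSBox inValue) := by
  unfold Pre_lookupSBox; infer_instance

def pvWitness_lookupSBox : List String := ["0", "1f", " Ff", "-1", "0x2a"]

def Spec_lookupSBox (inValue : List String) (out : List String) : Prop := out = lookupSBox_alt inValue
instance (inValue : List String) (out : List String) : Decidable (Spec_lookupSBox inValue out) := by unfold Spec_lookupSBox; infer_instance

-- ===== CLAIM (what is proved, stated in full; the proofs are below) =====
def Claim_equal_lookupSBox : Prop := ∀ (inValue : List String), Dom_lookupSBox inValue → Pre_lookupSBox inValue → Spec_lookupSBox inValue (lookupSBox inValue)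

-- ===== LEMMAS AND PROOFS =====

-- Nat mirrors of B's field arithmetic, used only to make kernel evaluation cheap
def gmulStepI (rab : Int × Int × Int) (_x : Nat) : Int × Int × Int :=
  let r := if PySem.Int.band rab.2.2 1 ≠ 0 then PySem.Int.bxor rab.1 rab.2.1 else rab.1
  let b' := rab.2.2 >>> (1 : Nat)
  let a' := rab.2.1 <<< (1 : Nat)
  let a' := if PySem.Int.band a' 256 ≠ 0 then PySem.Int.bxor a' 0x11b else a'
  (r, a', b')

def gmulStepN (rab : Nat × Nat × Nat) (_ : Nat) : Nat × Nat × Nat :=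
  let r := if rab.2.2 &&& 1 ≠ 0 then rab.1 ^^^ rab.2.1 else rab.1
  let b' := rab.2.2 >>> (1 : Nat)
  let a' := rab.2.1 <<< (1 : Nat)
  let a' := if a' &&& 256 ≠ 0 then a' ^^^ 0x11b else a'
  (r, a', b')

def gmulN (a b : Nat) : Nat := ((List.range 8).foldl gmulStepN (0, a, b)).1

def rotl8N (x : Nat) (k : Nat) : Nat := ((x <<< k) ||| (x >>> (8 - k))) &&& 0xFF

def sboxN (b : Nat) : Nat :=
  let inv := (List.range 6).foldl (fun inv _ => gmulN (gmulN inv inv) b) b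
  let inv := gmulN inv inv
  (((((inv ^^^ rotl8N inv 1) ^^^ rotl8N inv 2) ^^^ rotl8N inv 3) ^^^ rotl8N inv 4) ^^^ 0x63)

theorem shiftl_cast (a : Nat) (k : Nat) : ((a : Int) <<< k) = ((a <<< k : Nat) : Int) := rfl
theorem shiftr_cast (a : Nat) (k : Nat) : ((a : Int) >>> k) = ((a >>> k : Nat) : Int) := rfl

theorem gmulStep_cast (r a b x : Nat) :
    gmulStepI (↑r, ↑a, ↑b) x
      = (↑(gmulStepN (r, a, b) x).1, ↑(gmulStepN (r, a, b) x).2.1, ↑(gmulStepN (r, a, b) x).2.2) := by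
  unfold gmulStepI gmulStepN
  rw [show (1 : Int) = ((1 : Nat) : Int) from rfl,
      show (256 : Int) = ((256 : Nat) : Int) from rfl,
      show (0x11b : Int) = ((0x11b : Nat) : Int) from rfl]
  simp only [shiftl_cast, shiftr_cast, PySem.Int.band_natCast, PySem.Int.bxor_natCast,
    Nat.cast_ne_zero, apply_ite (fun n : Nat => (n : Int))]

theorem foldl_gmulStep_cast (l : List Nat) (r a b : Nat) :
    List.foldl gmulStepI (↑r, ↑a, ↑b) l
      = (↑(List.foldl gmulStepN (r, a, b) l).1,
         ↑(List.foldl gmulStepN (r, a, b) l).2.1,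
         ↑(List.foldl gmulStepN (r, a, b) l).2.2) := by
  induction l generalizing r a b with
  | nil => rfl
  | cons x t ih =>
    simp only [List.foldl_cons, gmulStep_cast]
    exact ih _ _ _

theorem gmul_cast (a b : Nat) : gmul ↑a ↑b = ↑(gmulN a b) := by
  have h : gmul ↑a ↑b = (List.foldl gmulStepI ((0:Int), (a:Int), (b:Int)) (List.range 8)).1 := rfl
  rw [h, show ((0:Int), (a:Int), (b:Int)) = (((0:Nat):Int), (a:Int), (b:Int)) from rfl,
      foldl_gmulStep_cast]
  rfl

theorem rotl8_cast (m k : Nat) : rotl8 ↑m k = ↑(rotl8N m k) := by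
  unfold rotl8 rotl8N
  rw [show (0xFF : Int) = ((0xFF : Nat) : Int) from rfl]
  simp only [shiftl_cast, shiftr_cast, PySem.Int.bor_natCast, PySem.Int.band_natCast]

theorem sbox_cast (m : Nat) : sboxByte ↑m = ↑(sboxN m) := by
  unfold sboxByte sboxN
  rw [show (0x63 : Int) = ((0x63 : Nat) : Int) from rfl]
  have hf : ∀ l : List Nat, ∀ inv : Nat,
      List.foldl (fun inv _ => gmul (gmul inv inv) ↑m) (↑inv : Int) l
        = ↑(List.foldl (fun inv _ => gmulN (gmulN inv inv) m) inv l) := by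
    intro l
    induction l with
    | nil => intro inv; rfl
    | cons x t ih =>
      intro inv
      simp only [List.foldl_cons, gmul_cast]
      exact ih _
  simp only [hf, gmul_cast, rotl8_cast, PySem.Int.bxor_natCast]

-- the three finite checks, phrased over Nat computations so the kernel evaluates them fast
set_option maxRecDepth 100000 in
set_option maxHeartbeats 4000000 in
theorem table_get (n : Fin 512) :
    PySem.List.pyGet? sBoxTable ((n : Int) - 256) = some (sBoxTable.getD ((n : Nat) % 256) 0) := by
  revert n; decide

set_option maxRecDepth 100000 in
set_option maxHeartbeats 4000000 in
theorem table_val (n : Fin 512) :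
    sBoxTable.getD ((n : Nat) % 256) 0 = ((sboxN ((n : Nat) &&& 255) : Nat) : Int) := by
  revert n; decide

set_option maxRecDepth 100000 in
set_option maxHeartbeats 4000000 in
theorem band_wrap (n : Fin 512) :
    PySem.Int.band ((n : Int) - 256) 255 = (((n : Nat) &&& 255 : Nat) : Int) := by
  revert n; decide

theorem elem_eq (s : String) (b : Int)
    (hp : PySem.Int.ofStrBase? s 16 = some b) (h1 : -256 ≤ b) (h2 : b ≤ 255) :
    lookupSBoxElemA s = lookupSBoxElemB s := by
  have hk : ((⟨(b + 256).toNat, by omega⟩ : Fin 512) : Int) - 256 = b := by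
    simp; omega
  have hget := table_get ⟨(b + 256).toNat, by omega⟩
  have hval := table_val ⟨(b + 256).toNat, by omega⟩
  have hband := band_wrap ⟨(b + 256).toNat, by omega⟩
  rw [hk] at hget hband
  rw [hval] at hget
  rw [← sbox_cast, ← hband] at hget
  simp [lookupSBoxElemA, lookupSBoxElemB, hp, hget]

theorem loopA_eq_map (xs : List String) :
    lookupSBox xs = xs.map lookupSBoxElemA := by
  unfold lookupSBox
  rw [PySem.List.foldl_append_singleton_eq_map]
  have h2 := congrArg (List.map lookupSBoxElemA) (PySem.List.map_pyGetD_pyRange_zero xs "")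
  rw [List.map_map] at h2
  simpa [Function.comp] using h2

-- ===== VERDICT (by name: the statement is the Claim_ definition above) =====
theorem lookupSBox_spec : Claim_equal_lookupSBox := by
  intro inValue _ hpre
  unfold Spec_lookupSBox lookupSBox_alt
  rw [loopA_eq_map]
  unfold Pre_lookupSBox at hpre
  rw [List.all_eq_true] at hpre
  apply List.map_congr_left
  intro s hs
  have := hpre s hs
  cases hp : PySem.Int.ofStrBase? s 16 with
  | none => rw [hp] at this; simp at this
  | some b =>
    rw [hp] at this; simp at this
    exact elem_eq s b hp this.1 this.2
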